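-- pv_equiv track=rewrite | github.com/captainLevi17/freeCodeCamp_python_daily | smallest_gap.py | smallest_gap
-- ===== SOURCE A (Python) =====
-- def smallest_gap(s):
--     last_seen = {}
--     min_gap = float('inf')
--     result = ""
--
--     for i, ch in enumerate(s):
--         if ch in last_seen:
--             gap = i - last_seen[ch] - 1
--
--             if gap < min_gap:
--                 min_gap = gap
--                 result = s[last_seen[ch] + 1:i]
--
--         last_seen[ch] = i
--
--     return result
-- ===== SOURCE B (Python) =====
-- def smallest_gap(s):
--     cands = []
--     for i in range(len(s)):
--         for j in range(i - 1, -1, -1):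
--             if s[j] == s[i]:
--                 cands.append((i - j - 1, i))
--                 break
--     if not cands:
--         return ""
--     g, i = min(cands)
--     return s[i - g:i]
-- ===== Notes on version B (the rewrite author's own statement) =====
-- stated objective: alternative
-- what changed: Replaces A's single pass with a last-seen dict and a running minimum by a brute-force two-phase scheme: collect every (gap, second-index) candidate via a backward scan per position, then pick the winner with one min() using Python's tuple tie-break and slice the substring from it.
import Mathlib
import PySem

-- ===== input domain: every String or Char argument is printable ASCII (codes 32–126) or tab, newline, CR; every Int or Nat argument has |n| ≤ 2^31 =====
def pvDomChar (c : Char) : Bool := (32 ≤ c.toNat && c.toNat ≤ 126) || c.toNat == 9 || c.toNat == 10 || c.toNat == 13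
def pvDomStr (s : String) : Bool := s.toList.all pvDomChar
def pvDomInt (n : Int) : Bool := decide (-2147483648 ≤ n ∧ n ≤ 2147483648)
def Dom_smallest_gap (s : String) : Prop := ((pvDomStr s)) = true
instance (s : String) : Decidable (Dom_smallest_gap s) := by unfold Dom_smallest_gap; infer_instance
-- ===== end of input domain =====

-- B replaces A's dict-of-last-positions with a running minimum by a candidate list built with a
-- backward scan per position, followed by one min() with Python's tuple tie-break (objective: alternative).

-- ===== PORT A =====
-- A's loop body; min_gap = float('inf') is ported as `none` (min_gap is only ever compared
-- with / replaced by integer gaps, so Option Int with none = +infinity is exact here).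
def sgStepA (cs : List Char) (st : PySem.Dict Char Int × Option Int × List Char)
    (p : Int × Char) : PySem.Dict Char Int × Option Int × List Char :=
  let (d, mg, res) := st
  let (i, ch) := p
  let (mg, res) :=
    match d.get? ch with
    | some j =>
      let gap := i - j - 1
      if (match mg with | none => true | some m => decide (gap < m)) then
        (some gap, PySem.List.slice cs (some (j + 1)) (some i))
      else (mg, res)
    | none => (mg, res)
  (d.insert ch i, mg, res)

def smallest_gap (s : String) : String :=
  let cs := s.toList
  let st := (PySem.List.enumerate cs 0).foldl (sgStepA cs)
    (PySem.Dict.empty, (none : Option Int), ([] : List Char))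
  String.ofList st.2.2

-- ===== PORT B =====
-- the inner `for j in range(i - 1, -1, -1): if s[j] == s[i]: … break` loop of Source B
def sgFindBack (cs : List Char) (ch : Char) : Nat → Option Nat
  | 0 => none
  | j + 1 => if cs.getD j ' ' == ch then some j else sgFindBack cs ch j

-- the candidate-collecting outer loop of Source B (cands after i iterations)
def sgCands (cs : List Char) (n : Nat) : List (Int × Int) :=
  (List.range n).foldl (fun acc i =>
    match sgFindBack cs (cs.getD i ' ') i with
    | some j => acc ++ [(((i : Int) - (j : Int) - 1), (i : Int))]
    | none => acc) []

def smallest_gap_alt (s : String) : String :=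
  let cs := s.toList
  match PySem.List.min2? (sgCands cs cs.length) (·.1) (·.2) with
  | none => ""
  | some (g, i) => String.ofList (PySem.List.slice cs (some (i - g)) (some i))

-- ===== PRECONDITION & SPEC =====
def Spec_smallest_gap (s : String) (out : String) : Prop := out = smallest_gap_alt s
instance (s : String) (out : String) : Decidable (Spec_smallest_gap s out) := by unfold Spec_smallest_gap; infer_instance

-- ===== CLAIM (what is proved, stated in full; the proofs are below) =====
def Claim_equal_smallest_gap : Prop := ∀ (s : String), Dom_smallest_gap s → Spec_smallest_gap s (smallest_gap s)

-- ===== LEMMAS AND PROOFS =====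

-- enumerate(s) as a map over range(len(s)) (indices paired with getD-style lookups)
theorem sg_enumerate_eq (cs : List Char) (s : Int) :
    PySem.List.enumerate cs s
      = (List.range cs.length).map (fun (k : Nat) => (s + (k : Int), cs.getD k ' ')) := by
  induction cs generalizing s with
  | nil => simp [PySem.List.enumerate]
  | cons c t ih =>
    simp [PySem.List.enumerate_cons, ih, List.range_succ_eq_map, List.map_map, Function.comp]
    intro a _
    ring

theorem sg_cands_succ (cs : List Char) (n : Nat) :
    sgCands cs (n + 1)
      = sgCands cs n ++
        (match sgFindBack cs (cs.getD n ' ') n with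
         | some j => [(((n : Int) - (j : Int) - 1), (n : Int))]
         | none => []) := by
  simp only [sgCands, List.range_succ, List.foldl_append, List.foldl]
  cases sgFindBack cs (cs.getD n ' ') n <;> simp

theorem sg_min2?_mem {α : Type} (xs : List α) (k1 k2 : α → Int) (m : α)
    (h : PySem.List.min2? xs k1 k2 = some m) : m ∈ xs := by
  induction xs using List.reverseRecOn with
  | nil => simp [PySem.List.min2?] at h
  | append_singleton t x ih =>
    simp only [PySem.List.min2?, List.foldl_append, List.foldl] at h
    cases hmt : List.foldl _ none t with
    | none => rw [hmt] at h; simp at h; simp [h]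
    | some m' =>
      rw [hmt] at h
      simp only at h
      split at h
      · simp at h; simp [h]
      · simp at h
        subst h
        have := ih hmt
        simp [this]

theorem sg_min2?_snoc (xs : List (Int × Int)) (x : Int × Int) :
    PySem.List.min2? (xs ++ [x]) (·.1) (·.2)
      = match PySem.List.min2? xs (·.1) (·.2) with
        | none => some x
        | some m => if x.1 < m.1 ∨ (¬ m.1 < x.1 ∧ x.2 < m.2) then some x else some m := by
  simp only [PySem.List.min2?, List.foldl_append, List.foldl]
  cases hmt : List.foldl _ none xs with
  | none => simp
  | some m => simp only; split_ifs with h1 h2 <;> simp_all <;> omega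

theorem sg_invariant (cs : List Char) (n : Nat) :
    (∀ ch, (((List.range n).map (fun (k : Nat) => ((k : Int), cs.getD k ' '))).foldl (sgStepA cs)
      (PySem.Dict.empty, (none : Option Int), ([] : List Char))).1.get? ch
        = (sgFindBack cs ch n).map (fun j => (j : Int)))
    ∧ (∀ c ∈ sgCands cs n, 0 ≤ c.2 ∧ c.2 < (n : Int))
    ∧ (((List.range n).map (fun (k : Nat) => ((k : Int), cs.getD k ' '))).foldl (sgStepA cs)
      (PySem.Dict.empty, (none : Option Int), ([] : List Char))).2
        = (match PySem.List.min2? (sgCands cs n) (·.1) (·.2) with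
           | none => ((none : Option Int), ([] : List Char))
           | some (g, i) => (some g, PySem.List.slice cs (some (i - g)) (some i))) := by
  induction n with
  | zero => simp [sgCands, PySem.List.min2?, sgFindBack, PySem.Dict.get?_empty]
  | succ n ih =>
    obtain ⟨ih1, ih2, ih3⟩ := ih
    set F := (((List.range n).map (fun (k : Nat) => ((k : Int), cs.getD k ' '))).foldl (sgStepA cs)
      (PySem.Dict.empty, (none : Option Int), ([] : List Char))) with hF
    have hstep : (((List.range (n+1)).map (fun (k : Nat) => ((k : Int), cs.getD k ' '))).foldl (sgStepA cs)
        (PySem.Dict.empty, (none : Option Int), ([] : List Char)))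
        = sgStepA cs F ((n : Int), cs.getD n ' ') := by
      rw [List.range_succ]; simp [List.foldl_append, hF]
    rw [hstep]
    have hFeta : F = (F.1, F.2.1, F.2.2) := rfl
    rw [sg_cands_succ]
    cases hfb : sgFindBack cs (cs.getD n ' ') n with
    | none =>
      have hget : F.1.get? (cs.getD n ' ') = none := by rw [ih1, hfb]; rfl
      refine ⟨?_, ?_, ?_⟩
      · intro ch
        by_cases hc : ch = cs.getD n ' '
        · subst hc
          rw [hFeta]; simp only [sgStepA, hget]
          rw [PySem.Dict.get?_insert_self]
          simp [sgFindBack]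
        · rw [hFeta]; simp only [sgStepA, hget]
          rw [PySem.Dict.get?_insert_of_ne _ _ hc]
          simp only [sgFindBack]
          rw [if_neg (by simpa using (Ne.symm hc)), ih1]
      · intro c hc
        simp only [List.append_nil] at hc
        have := ih2 c hc
        push_cast
        omega
      · rw [hFeta]; simp only [sgStepA, hget, List.append_nil]
        simpa using ih3
    | some j =>
      have hget : F.1.get? (cs.getD n ' ') = some (j : Int) := by rw [ih1, hfb]; rfl
      refine ⟨?_, ?_, ?_⟩
      · intro ch
        by_cases hc : ch = cs.getD n ' '
        · subst hc
          rw [hFeta]; simp only [sgStepA, hget]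
          rw [PySem.Dict.get?_insert_self]
          simp [sgFindBack]
        · rw [hFeta]; simp only [sgStepA, hget]
          rw [PySem.Dict.get?_insert_of_ne _ _ hc]
          simp only [sgFindBack]
          rw [if_neg (by simpa using (Ne.symm hc)), ih1]
      · intro c hc
        simp only [List.mem_append, List.mem_singleton] at hc
        rcases hc with hc | hc
        · have := ih2 c hc; push_cast; omega
        · subst hc
          refine ⟨by positivity, by push_cast; omega⟩
      · rw [hFeta]; simp only [sgStepA, hget]
        rw [sg_min2?_snoc]
        cases hmin : PySem.List.min2? (sgCands cs n) (·.1) (·.2) with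
        | none =>
          rw [hmin] at ih3
          simp only at ih3
          have hmg : F.2.1 = none := congrArg Prod.fst ih3
          rw [hmg]
          simp only
          simp only [if_true]
          rw [show ((n : Int)) - ((n : Int) - (j : Int) - 1) = (j : Int) + 1 from by omega]
        | some m =>
          obtain ⟨g0, i0⟩ := m
          rw [hmin] at ih3
          simp only at ih3
          have hmg : F.2.1 = some g0 := congrArg Prod.fst ih3
          have hres : F.2.2 = PySem.List.slice cs (some (i0 - g0)) (some i0) := congrArg Prod.snd ih3
          have hi0 : i0 < (n : Int) := by
            have hm := sg_min2?_mem _ _ _ _ hmin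
            exact (ih2 _ hm).2
          rw [hmg]
          simp only
          by_cases hlt : ((n : Int) - (j : Int) - 1) < g0
          · rw [if_pos (by simpa using hlt), if_pos (Or.inl hlt)]
            simp only
            rw [show ((n : Int)) - ((n : Int) - (j : Int) - 1) = (j : Int) + 1 from by omega]
          · rw [if_neg (by simpa using hlt), if_neg (by push Not; omega)]
            simp only
            rw [hres]

-- ===== VERDICT (by name: the statement is the Claim_ definition above) =====
theorem smallest_gap_spec : Claim_equal_smallest_gap := by
  intro s _
  unfold Spec_smallest_gap smallest_gap smallest_gap_alt
  simp only
  rw [sg_enumerate_eq]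
  simp only [zero_add]
  obtain ⟨-, -, h3⟩ := sg_invariant s.toList s.toList.length
  rw [h3]
  cases hm : PySem.List.min2? (sgCands s.toList s.toList.length) (·.1) (·.2) with
  | none => simp
  | some m => cases m; simp
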